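-- pv_equiv track=rewrite | github.com/KSimpson5624/File_Compare | source/compare.py | compare_with_counters
-- ===== SOURCE A (Python) =====
-- from collections import Counter
--
-- def compare_with_counters(gold_lines, new_lines):
--     gold_count = Counter(gold_lines)
--     new_count = Counter(new_lines)
--     differences = []
--
--     all_lines = set(gold_count) | set(new_count)
--     for line in all_lines:
--         diff = gold_count[line] - new_count[line]
--         if diff > 0:
--             differences.extend([f'Gold: {line}'] * diff)
--         elif diff < 0:
--             differences.extend([f'New: {line}'] * (-diff))
--     differences.sort()
--     return differences
-- ===== SOURCE B (Python) =====
-- def compare_with_counters(gold_lines, new_lines):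
--     g = sorted(gold_lines)
--     n = sorted(new_lines)
--     i = j = 0
--     diffs = []
--     while i < len(g) and j < len(n):
--         if g[i] == n[j]:
--             i += 1
--             j += 1
--         elif g[i] < n[j]:
--             diffs.append('Gold: ' + g[i])
--             i += 1
--         else:
--             diffs.append('New: ' + n[j])
--             j += 1
--     for x in g[i:]:
--         diffs.append('Gold: ' + x)
--     for x in n[j:]:
--         diffs.append('New: ' + x)
--     diffs.sort()
--     return diffs
-- ===== Notes on version B (the rewrite author's own statement) =====
-- stated objective: alternative
-- what changed: Replaces A's Counter tables and union-of-keys pass by sorting both lists and running a two-pointer merge that cancels equal heads and tags the unmatched surplus lines directly.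
import Mathlib
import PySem

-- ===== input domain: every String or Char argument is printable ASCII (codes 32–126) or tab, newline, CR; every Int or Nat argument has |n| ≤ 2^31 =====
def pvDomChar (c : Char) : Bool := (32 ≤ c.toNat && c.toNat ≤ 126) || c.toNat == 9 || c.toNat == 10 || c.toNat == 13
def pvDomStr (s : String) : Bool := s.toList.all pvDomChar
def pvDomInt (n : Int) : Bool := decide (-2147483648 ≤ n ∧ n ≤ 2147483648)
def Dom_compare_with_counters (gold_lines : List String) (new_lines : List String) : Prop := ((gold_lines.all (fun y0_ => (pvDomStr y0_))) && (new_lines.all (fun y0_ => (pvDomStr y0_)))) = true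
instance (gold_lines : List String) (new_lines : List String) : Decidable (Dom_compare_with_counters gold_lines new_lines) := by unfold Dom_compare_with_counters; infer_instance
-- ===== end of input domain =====

-- B drops A's Counter tables and union-of-keys pass entirely: it sorts both lists and runs a
-- two-pointer merge that cancels equal heads and tags the unmatched surplus lines (alternative algorithm, same cost).

-- ===== PORT A =====
def compare_with_counters (gold_lines : List String) (new_lines : List String) : List String :=
  let gold_count := PySem.Dict.counter gold_lines
  let new_count := PySem.Dict.counter new_lines
  -- all_lines = set(gold_count) | set(new_count); the loop's result is sorted, hence
  -- independent of Python's set-iteration order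
  let all_lines := PySem.Set.union (PySem.Set.ofList gold_count.keys) (PySem.Set.ofList new_count.keys)
  let differences := all_lines.foldl (fun acc line =>
    let diff := gold_count.getD line 0 - new_count.getD line 0
    if 0 < diff then acc ++ List.replicate diff.toNat ("Gold: " ++ line)
    else if diff < 0 then acc ++ List.replicate (-diff).toNat ("New: " ++ line)
    else acc) []
  PySem.List.sorted differences (fun x => x) false

-- ===== PORT B =====
-- the 'while i < len(g) and j < len(n)' two-pointer loop of Source B, with the two trailing
-- 'for x in g[i:] / n[j:]' extensions as the base cases (suffixes = the lists still unconsumed)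
def pvMerge : List String → List String → List String
  | [], n => n.map (fun x => "New: " ++ x)
  | a :: g, [] => (a :: g).map (fun x => "Gold: " ++ x)
  | a :: g, b :: n =>
    if a = b then pvMerge g n
    else if a < b then ("Gold: " ++ a) :: pvMerge g (b :: n)
    else ("New: " ++ b) :: pvMerge (a :: g) n
  termination_by g n => g.length + n.length

def compare_with_counters_alt (gold_lines : List String) (new_lines : List String) : List String :=
  let g := PySem.List.sorted gold_lines (fun x => x) false
  let n := PySem.List.sorted new_lines (fun x => x) false
  PySem.List.sorted (pvMerge g n) (fun x => x) false

-- ===== PRECONDITION & SPEC =====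
def Spec_compare_with_counters (gold_lines : List String) (new_lines : List String) (out : List String) : Prop := out = compare_with_counters_alt gold_lines new_lines
instance (gold_lines : List String) (new_lines : List String) (out : List String) : Decidable (Spec_compare_with_counters gold_lines new_lines out) := by unfold Spec_compare_with_counters; infer_instance

-- ===== CLAIM (what is proved, stated in full; the proofs are below) =====
def Claim_equal_compare_with_counters : Prop := ∀ (gold_lines : List String) (new_lines : List String), Dom_compare_with_counters gold_lines new_lines → Spec_compare_with_counters gold_lines new_lines (compare_with_counters gold_lines new_lines)

-- ===== LEMMAS AND PROOFS =====

-- per-key contribution of A's loop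
def pvBlockA (g n : List String) (k : String) : List String :=
  let d : Int := g.count k - n.count k
  if 0 < d then List.replicate d.toNat ("Gold: " ++ k)
  else if d < 0 then List.replicate (-d).toNat ("New: " ++ k)
  else []

def pvBlockG (g n : List String) (k : String) : List String :=
  let d : Int := g.count k - n.count k
  if 0 < d then List.replicate d.toNat ("Gold: " ++ k) else []

def pvBlockN (g n : List String) (k : String) : List String :=
  let d : Int := n.count k - g.count k
  if 0 < d then List.replicate d.toNat ("New: " ++ k) else []

-- untagged surplus copies of key k
def pvRep (g n : List String) (k : String) : List String :=
  List.replicate ((g.count k : Int) - n.count k).toNat k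

theorem pvBlockA_eq (g n : List String) (k : String) :
    pvBlockA g n k = pvBlockG g n k ++ pvBlockN g n k := by
  simp only [pvBlockA, pvBlockG, pvBlockN]
  split_ifs with h1 h2 h3 h4 <;> simp_all
  omega

theorem pvBlockG_map (g n : List String) (k : String) :
    pvBlockG g n k = (pvRep g n k).map (fun x => "Gold: " ++ x) := by
  simp only [pvBlockG, pvRep, List.map_replicate]
  split_ifs with h
  · rfl
  · have : ((g.count k : Int) - n.count k).toNat = 0 := by omega
    simp [this]

theorem pvBlockN_map (g n : List String) (k : String) :
    pvBlockN g n k = (pvRep n g k).map (fun x => "New: " ++ x) := by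
  simp only [pvBlockN, pvRep, List.map_replicate]
  split_ifs with h
  · rfl
  · have : ((n.count k : Int) - g.count k).toNat = 0 := by omega
    simp [this]

theorem pv_perm_flatMap_append {α β : Type} (l : List α) (f g : α → List β) :
    (l.flatMap fun x => f x ++ g x).Perm (l.flatMap f ++ l.flatMap g) := by
  induction l with
  | nil => simp
  | cons a t ih =>
    simp only [List.flatMap_cons, List.append_assoc]
    exact ((ih.append_left _).append_left _).trans
      ((List.perm_append_comm_assoc _ _ _).append_left _)

-- count of s in a flatMap of replicate-blocks over a nodup key list
theorem pv_count_flatMap_rep (U : List String) (hU : U.Nodup) (d : String → Nat) (s : String) :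
    (U.flatMap (fun k => List.replicate (d k) k)).count s = if s ∈ U then d s else 0 := by
  induction U with
  | nil => simp
  | cons a t ih =>
    rcases List.nodup_cons.mp hU with ⟨ha, ht⟩
    simp only [List.flatMap_cons, List.count_append, List.count_replicate, ih ht, List.mem_cons]
    by_cases hs : s = a
    · subst hs; simp [ha]
    · simp [hs, if_neg (Ne.symm hs)]

-- the surplus copies over the key set are exactly the multiset difference g - n
theorem pv_rep_perm_diff (g n U : List String) (hU : U.Nodup) (hg : ∀ s ∈ g, s ∈ U) :
    (U.flatMap (pvRep g n)).Perm (g.diff n) := by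
  rw [List.perm_iff_count]
  intro s
  have : U.flatMap (pvRep g n)
      = U.flatMap (fun k => List.replicate (((g.count k : Int) - n.count k).toNat) k) := rfl
  rw [this, pv_count_flatMap_rep U hU, List.count_diff]
  by_cases hs : s ∈ U
  · simp only [hs, if_pos]; omega
  · have hsg : s ∉ g := fun h => hs (hg s h)
    simp [hs, List.count_eq_zero_of_not_mem hsg]

-- the two-pointer merge of sorted lists produces the tagged multiset differences
theorem pv_merge_perm : ∀ (g n : List String), g.Pairwise (· ≤ ·) → n.Pairwise (· ≤ ·) →
    (pvMerge g n).Perm ((g.diff n).map (fun x => "Gold: " ++ x)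
                        ++ (n.diff g).map (fun x => "New: " ++ x)) := by
  intro g n hg hn
  induction g, n using pvMerge.induct with
  | case1 n => simp [pvMerge]
  | case2 a g => simp [pvMerge]
  | case3 g b n ih =>
    rcases List.pairwise_cons.mp hg with ⟨_, hg'⟩
    rcases List.pairwise_cons.mp hn with ⟨_, hn'⟩
    have h1 : (b :: g).diff (b :: n) = g.diff n := by
      rw [List.diff_cons, List.erase_cons_head]
    have h2 : (b :: n).diff (b :: g) = n.diff g := by
      rw [List.diff_cons, List.erase_cons_head]
    simpa [pvMerge, h1, h2] using ih hg' hn'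
  | case4 a g b n hne hlt ih =>
    rcases List.pairwise_cons.mp hn with ⟨hbn, hn'⟩
    have hnot : a ∉ b :: n := by
      intro hmem
      rcases List.mem_cons.mp hmem with rfl | hx
      · exact hne rfl
      · exact absurd rfl (ne_of_lt (lt_of_lt_of_le hlt (hbn a hx)))
    have h1 : (a :: g).diff (b :: n) = a :: g.diff (b :: n) := by
      rw [List.cons_diff, if_neg hnot]
    have h2 : (b :: n).diff (a :: g) = (b :: n).diff g := by
      rw [List.diff_cons, List.erase_of_not_mem hnot]
    have ih' := ih (List.pairwise_cons.mp hg).2 hn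
    simp only [pvMerge, if_neg hne, if_pos hlt, h1, h2, List.map_cons, List.cons_append]
    exact ih'.cons _
  | case5 a g b n hne hnlt ih =>
    rcases List.pairwise_cons.mp hg with ⟨hag, hg'⟩
    have hba : b < a := Std.lt_of_le_of_ne hnlt fun h => hne h.symm
    have hnot : b ∉ a :: g := by
      intro hmem
      rcases List.mem_cons.mp hmem with rfl | hx
      · exact hne rfl
      · exact absurd rfl (ne_of_lt (lt_of_lt_of_le hba (hag b hx)))
    have h1 : (a :: g).diff (b :: n) = (a :: g).diff n := by
      rw [List.diff_cons, List.erase_of_not_mem hnot]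
    have h2 : (b :: n).diff (a :: g) = b :: n.diff (a :: g) := by
      rw [List.cons_diff, if_neg hnot]
    have ih' := ih hg (List.pairwise_cons.mp hn).2
    simp only [pvMerge, if_neg hne, if_neg hnlt, h1, h2, List.map_cons]
    exact (ih'.cons _).trans List.perm_middle.symm

theorem pv_sorted_eq_of_perm (xs ys : List String) (h : xs.Perm ys) :
    PySem.List.sorted xs (fun x => x) false = PySem.List.sorted ys (fun x => x) false := by
  refine List.Perm.eq_of_pairwise (fun a b _ _ hab hba => le_antisymm hab hba)
    (PySem.List.sorted_pairwise ..) (PySem.List.sorted_pairwise ..) ?_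
  exact (PySem.List.sorted_perm ..).trans (h.trans (PySem.List.sorted_perm ..).symm)

theorem compare_with_counters_spec : Claim_equal_compare_with_counters := by
  intro g n _
  unfold Spec_compare_with_counters compare_with_counters compare_with_counters_alt
  simp only [PySem.Dict.getD_counter, PySem.Dict.keys_counter, PySem.Set.ofList_ofList]
  have hfun : (fun (acc : List String) line =>
      if 0 < ((g.count line : Int)) - n.count line then
        acc ++ List.replicate (((g.count line : Int)) - n.count line).toNat ("Gold: " ++ line)
      else
        if ((g.count line : Int)) - n.count line < 0 then
          acc ++ List.replicate (-(((g.count line : Int)) - n.count line)).toNat ("New: " ++ line)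
        else acc)
      = fun acc line => acc ++ pvBlockA g n line := by
    funext acc line
    simp only [pvBlockA]
    split_ifs <;> simp
  rw [hfun, PySem.List.foldl_append_eq_flatMap, List.nil_append]
  apply pv_sorted_eq_of_perm
  set U := (PySem.Set.ofList g).union (PySem.Set.ofList n) with hU
  have hUnd : U.Nodup := PySem.Set.nodup_union _ _ (PySem.Set.nodup_ofList g)
  have hUg : ∀ s ∈ g, s ∈ U := fun s hs => by
    simp [hU, PySem.Set.mem_union, PySem.Set.mem_ofList, hs]
  have hUn : ∀ s ∈ n, s ∈ U := fun s hs => by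
    simp [hU, PySem.Set.mem_union, PySem.Set.mem_ofList, hs]
  -- A's union pass splits into the two tagged difference multisets
  have h1 : (U.flatMap (pvBlockA g n)).Perm
      (U.flatMap (pvBlockG g n) ++ U.flatMap (pvBlockN g n)) := by
    have := pv_perm_flatMap_append U (pvBlockG g n) (pvBlockN g n)
    simpa [funext (pvBlockA_eq g n)] using this
  have hGmap : U.flatMap (pvBlockG g n) = (U.flatMap (pvRep g n)).map (fun x => "Gold: " ++ x) := by
    rw [List.map_flatMap]
    exact congrFun (congrArg List.flatMap (funext (pvBlockG_map g n))) U
  have hNmap : U.flatMap (pvBlockN g n) = (U.flatMap (pvRep n g)).map (fun x => "New: " ++ x) := by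
    rw [List.map_flatMap]
    exact congrFun (congrArg List.flatMap (funext (pvBlockN_map g n))) U
  have h2 : (U.flatMap (pvBlockA g n)).Perm
      ((g.diff n).map (fun x => "Gold: " ++ x) ++ (n.diff g).map (fun x => "New: " ++ x)) := by
    refine h1.trans (List.Perm.append ?_ ?_)
    · rw [hGmap]; exact (pv_rep_perm_diff g n U hUnd hUg).map _
    · rw [hNmap]; exact (pv_rep_perm_diff n g U hUnd hUn).map _
  -- B's merge of the sorted lists is the same multiset
  have hsg := PySem.List.sorted_perm g (fun x => x) false
  have hsn := PySem.List.sorted_perm n (fun x => x) false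
  have h3 : (pvMerge (PySem.List.sorted g (fun x => x) false)
                     (PySem.List.sorted n (fun x => x) false)).Perm
      ((g.diff n).map (fun x => "Gold: " ++ x) ++ (n.diff g).map (fun x => "New: " ++ x)) := by
    have hm := pv_merge_perm _ _
      (PySem.List.sorted_pairwise g (fun x => x))
      (PySem.List.sorted_pairwise n (fun x => x))
    exact hm.trans (List.Perm.append ((hsg.diff hsn).map _) ((hsn.diff hsg).map _))
  exact h2.trans h3.symm
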